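-- pv_equiv track=rewrite | github.com/danschiff/utility-TalentEngineeringMetricsAnalysis | src/populate_team_slide.py | get_latest_months
-- ===== SOURCE A (Python) =====
-- def get_latest_months(team_metrics, count=2):
--     """Return the latest month labels from ordered team metrics with actual values."""
--     if not team_metrics:
--         return []
--
--     month_labels = list(team_metrics.keys())
--     selected = []
--     for month in reversed(month_labels):
--         month_data = team_metrics.get(month, [])
--         if any(entry.get('value') is not None for entry in month_data):
--             selected.append(month)
--             if len(selected) == count:
--                 break
--
--     if len(selected) == count:
--         return list(reversed(selected))
--
--     # Fallback to last available month keys when not enough filled months exist.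
--     if len(month_labels) < count:
--         return month_labels
--     return month_labels[-count:]
-- ===== SOURCE B (Python) =====
-- def get_latest_months(team_metrics, count=2):
--     """Return the latest month labels from ordered team metrics with actual values."""
--     keys = []
--     window = []
--     nfilled = 0
--     for month, entries in team_metrics.items():
--         keys.append(month)
--         if any(e.get('value') is not None for e in entries):
--             nfilled += 1
--             window.append(month)
--             if count < len(window):
--                 window.pop(0)
--     if count <= nfilled:
--         return window
--     return keys if len(keys) < count else keys[-count:]
-- ===== Notes on version B (the rewrite author's own statement) =====
-- stated objective: alternative
-- what changed: Replaces A's reversed scan with an early break (plus a separate key-list pass for the fallback) by one forward streaming pass that maintains a bounded sliding window of the last `count` filled months together with a filled counter and the key list, so no reversal and no second traversal is needed.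
-- outside the precondition, e.g. on get_latest_months({'a': [{'value': 1}], 'b': []}, 0): A returns ['a', 'b'], B returns []; on get_latest_months({'a': [{'value': 1}], 'b': []}, -1): A returns ['b'], B returns []
import Mathlib
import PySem

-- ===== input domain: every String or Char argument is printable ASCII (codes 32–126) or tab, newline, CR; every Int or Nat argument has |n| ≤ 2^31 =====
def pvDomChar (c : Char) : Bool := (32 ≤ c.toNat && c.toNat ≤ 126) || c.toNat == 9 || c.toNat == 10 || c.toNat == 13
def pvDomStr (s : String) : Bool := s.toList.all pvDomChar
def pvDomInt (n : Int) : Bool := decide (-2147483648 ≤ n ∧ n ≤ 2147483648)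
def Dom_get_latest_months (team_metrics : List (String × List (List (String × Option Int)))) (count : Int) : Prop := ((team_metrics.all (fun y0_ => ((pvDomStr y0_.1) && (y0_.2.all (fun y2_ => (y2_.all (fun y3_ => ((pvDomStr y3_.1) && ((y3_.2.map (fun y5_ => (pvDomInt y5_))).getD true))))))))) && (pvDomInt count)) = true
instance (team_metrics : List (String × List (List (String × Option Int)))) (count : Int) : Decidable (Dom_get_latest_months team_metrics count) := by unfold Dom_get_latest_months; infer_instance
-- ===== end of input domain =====

-- B replaces A's reversed early-break scan by one forward streaming pass keeping a bounded window of the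
-- last `count` filled months, a filled counter and the key list (objective: alternative, same cost).


-- shared helper: `any(entry.get('value') is not None for entry in month_data)` (appears verbatim in both Pythons)
def pvHasValue (month_data : List (List (String × Option Int))) : Bool :=
  month_data.any (fun entry => ((PySem.Dict.mk entry).getD "value" none).isSome)

-- ===== PORT A =====
-- the reversed loop with its early break: structural recursion over the remaining reversed labels, carrying `selected`
def pvLoopA (team_metrics : List (String × List (List (String × Option Int)))) (count : Int) :
    List String → List String → List String
  | [], selected => selected
  | month :: rest, selected =>
    if pvHasValue ((PySem.Dict.mk team_metrics).getD month []) then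
      let s := selected ++ [month]
      if (s.length : Int) = count then s else pvLoopA team_metrics count rest s
    else pvLoopA team_metrics count rest selected

def get_latest_months (team_metrics : List (String × List (List (String × Option Int)))) (count : Int) : List String :=
  if team_metrics = [] then []
  else
    let month_labels := (PySem.Dict.mk team_metrics).keys
    let selected := pvLoopA team_metrics count month_labels.reverse []
    if (selected.length : Int) = count then selected.reverse
    else if (month_labels.length : Int) < count then month_labels
    else PySem.List.slice month_labels (some (-count)) none

-- ===== PORT B =====
-- the single forward pass over team_metrics.items(), carrying (keys, window, nfilled)
def pvLoopB (count : Int) :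
    List (String × List (List (String × Option Int))) → List String → List String → Int →
    List String × List String × Int
  | [], keys, window, nfilled => (keys, window, nfilled)
  | (month, entries) :: rest, keys, window, nfilled =>
    if pvHasValue entries then
      let w := window ++ [month]
      pvLoopB count rest (keys ++ [month]) (if count < (w.length : Int) then w.drop 1 else w) (nfilled + 1)
    else pvLoopB count rest (keys ++ [month]) window nfilled

def get_latest_months_alt (team_metrics : List (String × List (List (String × Option Int)))) (count : Int) : List String :=
  match pvLoopB count (PySem.Dict.mk team_metrics).items [] [] 0 with
  | (keys, window, nfilled) =>
    if count ≤ nfilled then window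
    else if (keys.length : Int) < count then keys
    else PySem.List.slice keys (some (-count)) none

-- ===== PRECONDITION & SPEC =====
-- Pre_ restricts to the natural domain: count ≥ 1 on a nonempty dict (A also returns on count ≤ 0, where its `[-0:]` /
-- negative-count slice fallback yields the whole (or a truncated) raw key list — an artefact outside the function's
-- purpose; on the empty dict both agree for every count, so it stays inside), and distinct keys — the assoc list
-- stands for a Python dict, which cannot hold duplicate keys, so no Python input is excluded by that conjunct.
def Pre_get_latest_months (team_metrics : List (String × List (List (String × Option Int)))) (count : Int) : Prop :=
  (1 ≤ count ∨ team_metrics = []) ∧ (team_metrics.map Prod.fst).Nodup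
instance (team_metrics : List (String × List (List (String × Option Int)))) (count : Int) : Decidable (Pre_get_latest_months team_metrics count) := by unfold Pre_get_latest_months; infer_instance

def pvWitness_get_latest_months : (List (String × List (List (String × Option Int)))) × Int :=
  ([("a", [[("value", some 1)]]), ("b", [])], 1)

def Spec_get_latest_months (team_metrics : List (String × List (List (String × Option Int)))) (count : Int) (out : List String) : Prop := out = get_latest_months_alt team_metrics count
instance (team_metrics : List (String × List (List (String × Option Int)))) (count : Int) (out : List String) : Decidable (Spec_get_latest_months team_metrics count out) := by unfold Spec_get_latest_months; infer_instance

-- ===== CLAIM (what is proved, stated in full; the proofs are below) =====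
def Claim_equal_get_latest_months : Prop := ∀ (team_metrics : List (String × List (List (String × Option Int)))) (count : Int), Dom_get_latest_months team_metrics count → Pre_get_latest_months team_metrics count → Spec_get_latest_months team_metrics count (get_latest_months team_metrics count)

-- ===== LEMMAS AND PROOFS =====

-- A's loop collects, after `s`, the first (count - |s|) filled months of the remaining reversed labels
theorem pvLoopA_eq (tm : List (String × List (List (String × Option Int)))) (count : Int)
    (l : List String) : ∀ s : List String, (s.length : Int) < count →
    pvLoopA tm count l s =
      s ++ (l.filter (fun m => pvHasValue ((PySem.Dict.mk tm).getD m []))).take (count - s.length).toNat := by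
  induction l with
  | nil => intro s _; simp [pvLoopA]
  | cons m rest ih =>
    intro s hs
    rw [pvLoopA, List.filter_cons]
    by_cases hm : pvHasValue ((PySem.Dict.mk tm).getD m []) = true
    · simp only [hm, if_true]
      by_cases hlen : ((s ++ [m]).length : Int) = count
      · rw [if_pos hlen]
        have h1 : (count - (s.length : Int)).toNat = 1 := by
          simp only [List.length_append, List.length_cons, List.length_nil] at hlen; omega
        rw [h1, List.take_succ_cons, List.take_zero]
      · rw [if_neg hlen]
        have hlt : ((s ++ [m]).length : Int) < count := by
          simp only [List.length_append, List.length_cons, List.length_nil] at hlen ⊢; omega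
        rw [ih _ hlt]
        have h1 : (count - (s.length : Int)).toNat = (count - ((s ++ [m]).length : Int)).toNat + 1 := by
          simp only [List.length_append, List.length_cons, List.length_nil]; omega
        rw [h1, List.take_succ_cons, List.append_assoc]
        rfl
    · simp only [hm, Bool.false_eq_true, if_false]
      exact ih s hs

-- the sliding window `xs.drop (xs.length - k)` is the reversed k-prefix of the reverse
theorem pvLastN_eq_rev {α : Type} (k : Nat) (xs : List α) :
    xs.drop (xs.length - k) = (xs.reverse.take k).reverse := by
  rw [List.reverse_take, List.reverse_reverse, List.length_reverse]

-- absorbing: re-windowing a window extended on the right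
theorem pvLastN_absorb {α : Type} (k : Nat) (xs ys : List α) :
    ((xs.drop (xs.length - k)) ++ ys).drop (((xs.drop (xs.length - k)) ++ ys).length - k)
      = (xs ++ ys).drop ((xs ++ ys).length - k) := by
  rw [pvLastN_eq_rev, pvLastN_eq_rev k (xs ++ ys), pvLastN_eq_rev k xs]
  rw [List.reverse_append, List.reverse_append, List.reverse_reverse]
  congr 1
  rw [List.take_append, List.take_append, List.take_take]
  congr 2
  omega

-- B's loop: keys accumulates all labels, window is the last-k slice of the filled labels, nfilled counts them
theorem pvLoopB_eq (count : Int) (hc : 1 ≤ count)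
    (l : List (String × List (List (String × Option Int)))) :
    ∀ (keys window : List String) (n : Int), window.length ≤ count.toNat →
    pvLoopB count l keys window n =
      (keys ++ l.map Prod.fst,
       (window ++ ((l.filter (fun p => pvHasValue p.2)).map Prod.fst)).drop
         ((window ++ ((l.filter (fun p => pvHasValue p.2)).map Prod.fst)).length - count.toNat),
       n + (((l.filter (fun p => pvHasValue p.2)).length : Int))) := by
  induction l with
  | nil =>
    intro keys window n hw
    simp only [pvLoopB, List.map_nil, List.append_nil, List.filter_nil, List.length_nil,
      Int.natCast_zero, add_zero]
    rw [Nat.sub_eq_zero_of_le hw, List.drop_zero]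
  | cons p rest ih =>
    intro keys window n hw
    obtain ⟨m, entries⟩ := p
    rw [pvLoopB, List.filter_cons]
    by_cases hm : pvHasValue entries = true
    · simp only [hm, if_true]
      have hstep : (if count < (((window ++ [m]).length : Nat) : Int) then (window ++ [m]).drop 1 else window ++ [m])
          = (window ++ [m]).drop ((window ++ [m]).length - count.toNat) := by
        by_cases hfull : window.length = count.toNat
        · rw [if_pos (by simp only [List.length_append, List.length_cons, List.length_nil]; omega)]
          congr 1
          simp only [List.length_append, List.length_cons, List.length_nil]; omega
        · rw [if_neg (by simp only [List.length_append, List.length_cons, List.length_nil]; omega)]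
          rw [Nat.sub_eq_zero_of_le (by simp only [List.length_append, List.length_cons, List.length_nil]; omega),
            List.drop_zero]
      rw [hstep, ih _ _ _ (by simp only [List.length_drop, List.length_append]; omega)]
      refine Prod.ext (by simp) (Prod.ext ?_ ?_)
      · show ((window ++ [m]).drop ((window ++ [m]).length - count.toNat) ++ _).drop _ = _
        rw [pvLastN_absorb count.toNat (window ++ [m])]
        simp only [List.map_cons, List.append_assoc, List.cons_append, List.nil_append]
      · show n + 1 + _ = n + _
        simp only [List.length_cons]
        push_cast; ring
    · simp only [hm, Bool.false_eq_true, if_false]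
      rw [ih _ _ _ hw]
      simp

theorem get_latest_months_spec : Claim_equal_get_latest_months := by
  intro tm count _hdom hpre
  obtain ⟨hcE, hnd⟩ := hpre
  unfold Spec_get_latest_months get_latest_months get_latest_months_alt
  by_cases htm : tm = []
  · subst htm
    rw [if_pos rfl]
    show [] = if count ≤ (0 : Int) then ([] : List String)
      else if ((([] : List String).length : Int) < count) then ([] : List String)
      else PySem.List.slice ([] : List String) (some (-count)) none
    by_cases h0 : count ≤ (0 : Int)
    · rw [if_pos h0]
    · rw [if_neg h0, if_pos (by simp only [List.length_nil, Int.natCast_zero]; omega)]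
  have hc : 1 ≤ count := hcE.resolve_right htm
  have hkeys : (PySem.Dict.mk tm).keys = tm.map Prod.fst := rfl
  have hitems : (PySem.Dict.mk tm).items = tm := rfl
  -- with distinct keys, A's per-key lookup recovers exactly each item's own value list
  have hfilter : ((tm.map Prod.fst).filter (fun m => pvHasValue ((PySem.Dict.mk tm).getD m [])))
      = (tm.filter (fun p => pvHasValue p.2)).map Prod.fst := by
    rw [List.filter_map]
    congr 1
    apply List.filter_congr
    intro p hp
    have : (PySem.Dict.mk tm).getD p.1 [] = p.2 :=
      PySem.Dict.getD_of_mem_items (d := PySem.Dict.mk tm) (by rw [hitems]; exact hp) (by rw [hkeys]; exact hnd) _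
    simp [Function.comp, this]
  have hloopB := pvLoopB_eq count hc tm [] [] 0 (by simp)
  simp only [List.nil_append, List.length_map, zero_add] at hloopB
  set f := (tm.filter (fun p => pvHasValue p.2)).map Prod.fst with hf
  have hloopA : pvLoopA tm count (tm.map Prod.fst).reverse []
      = (f.reverse).take count.toNat := by
    rw [pvLoopA_eq tm count _ [] (by simpa using hc), List.filter_reverse, hfilter]
    simp [hf]
  have hflen : (f.length : Int) = ((tm.filter (fun p => pvHasValue p.2)).length : Int) := by
    simp [hf]
  have hflen' : (tm.filter (fun p => pvHasValue p.2)).length = f.length := by simp [hf]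
  simp only [hkeys, hloopB, hloopA, hflen']
  rw [if_neg htm]
  by_cases hbig : count ≤ (f.length : Int)
  · -- enough filled months: A's break fires with count of them; B returns its window
    have hlenA : ((f.reverse).take count.toNat).length = count.toNat := by
      simp only [List.length_take, List.length_reverse]; omega
    rw [if_pos (by rw [hlenA]; omega), if_pos hbig, pvLastN_eq_rev]
  · have hlenA : ((f.reverse).take count.toNat).length = f.length := by
      simp only [List.length_take, List.length_reverse]; omega
    rw [if_neg (by rw [hlenA]; omega), if_neg hbig]
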